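-- pv_equiv track=rewrite | github.com/ketstap162/ExercisesFromUdemy | Ex12_MiniSudoku.py | any_duplicates
-- ===== SOURCE A (Python) =====
-- def any_duplicates(square):
--     new_lst=[]
--     for x in square:
--         for y in x:
--             new_lst.append(y)
--     if len(set(new_lst))==len(new_lst):
--         return False
--     else:
--         return True
-- ===== SOURCE B (Python) =====
-- def any_duplicates(square):
--     seen = set()
--     for row in square:
--         for v in row:
--             if v in seen:
--                 return True
--             seen.add(v)
--     return False
-- ===== Notes on version B (the rewrite author's own statement) =====
-- stated objective: simpler
-- what changed: Instead of flattening the grid into a new list and comparing len(set(...)) to len(...), B keeps one 'seen' set and short-circuits, returning True at the first repeated cell and False only after scanning everything.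
import Mathlib
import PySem

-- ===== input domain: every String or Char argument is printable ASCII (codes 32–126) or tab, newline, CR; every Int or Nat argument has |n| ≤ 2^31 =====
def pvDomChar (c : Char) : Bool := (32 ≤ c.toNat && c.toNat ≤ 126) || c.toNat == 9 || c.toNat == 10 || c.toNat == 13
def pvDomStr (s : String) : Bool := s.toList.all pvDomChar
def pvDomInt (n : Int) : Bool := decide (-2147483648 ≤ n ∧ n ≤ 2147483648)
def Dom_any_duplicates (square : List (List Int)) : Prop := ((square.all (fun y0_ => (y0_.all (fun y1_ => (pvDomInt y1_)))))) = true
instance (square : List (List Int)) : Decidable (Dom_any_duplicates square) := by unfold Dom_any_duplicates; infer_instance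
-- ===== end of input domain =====

-- B replaces A's "flatten everything, then compare set size with list size" by a single
-- short-circuiting scan with a 'seen' set (objective: simpler).


-- ===== PORT A =====
def any_duplicates (square : List (List Int)) : Bool :=
  let new_lst := square.foldl (fun acc x => x.foldl (fun acc2 y => acc2 ++ [y]) acc) []
  if PySem.Set.len (PySem.Set.ofList new_lst) == (new_lst.length : Int) then false else true

-- ===== PORT B =====
-- inner 'for v in row' loop: none = duplicate found (early return True), some = updated seen
def altRow (row : List Int) (seen : PySem.Set Int) : Option (PySem.Set Int) :=
  match row with
  | [] => some seen
  | v :: vs => if PySem.Set.contains seen v then none else altRow vs (PySem.Set.add seen v)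

-- outer 'for row in square' loop
def altGo (rows : List (List Int)) (seen : PySem.Set Int) : Bool :=
  match rows with
  | [] => false
  | r :: rs =>
    match altRow r seen with
    | none => true
    | some seen' => altGo rs seen'

def any_duplicates_alt (square : List (List Int)) : Bool :=
  altGo square PySem.Set.empty

-- ===== PRECONDITION & SPEC =====
def Spec_any_duplicates (square : List (List Int)) (out : Bool) : Prop := out = any_duplicates_alt square
instance (square : List (List Int)) (out : Bool) : Decidable (Spec_any_duplicates square out) := by unfold Spec_any_duplicates; infer_instance

-- ===== CLAIM (what is proved, stated in full; the proofs are below) =====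
def Claim_equal_any_duplicates : Prop := ∀ (square : List (List Int)), Dom_any_duplicates square → Spec_any_duplicates square (any_duplicates square)

-- ===== LEMMAS AND PROOFS =====

-- A's nested append loops build init ++ flatten
theorem pv_flatten (square : List (List Int)) (init : List Int) :
    square.foldl (fun acc x => x.foldl (fun acc2 y => acc2 ++ [y]) acc) init
      = init ++ square.flatten := by
  induction square generalizing init with
  | nil => simp
  | cons r rs ih =>
    rw [List.foldl_cons, PySem.List.foldl_append_singleton, ih, List.flatten_cons,
      List.append_assoc]

theorem pv_add_len_le (l : List Int) (s : PySem.Set Int) :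
    (l.foldl PySem.Set.add s).length ≤ s.length + l.length := by
  induction l generalizing s with
  | nil => simp
  | cons v vs ih =>
    simp only [List.foldl, PySem.Set.add]
    by_cases h : (s : List Int).contains v = true
    · rw [if_pos h]
      have := ih s
      simp only [List.length_cons]
      omega
    · rw [if_neg h]
      have := ih (s ++ [v])
      simp only [List.length_append, List.length_cons,
        List.length_nil] at this ⊢
      omega

theorem pv_foldl_add_of_nodup (l : List Int) (s : PySem.Set Int) (h : (s ++ l).Nodup) :
    l.foldl PySem.Set.add s = s ++ l := by
  induction l generalizing s with
  | nil => simp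
  | cons v vs ih =>
    have hv : v ∉ (s : List Int) := by
      intro hmem
      exact (List.disjoint_of_nodup_append h) hmem (by simp)
    have hc : (s : List Int).contains v = false := by simpa using hv
    have h' : ((s ++ [v]) ++ vs).Nodup := by simpa using h
    simp only [List.foldl, PySem.Set.add, hc, Bool.false_eq_true, if_false]
    rw [ih (s ++ [v]) h']
    simp

theorem pv_foldl_add_lt (l : List Int) (s : PySem.Set Int)
    (hs : (s : List Int).Nodup) (h : ¬ (s ++ l).Nodup) :
    (l.foldl PySem.Set.add s).length < s.length + l.length := by
  induction l generalizing s with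
  | nil => simp at h; exact absurd hs h
  | cons v vs ih =>
    simp only [List.foldl, PySem.Set.add]
    by_cases hv : v ∈ (s : List Int)
    · have hc : (s : List Int).contains v = true := List.elem_eq_true_of_mem hv
      rw [if_pos hc]
      have := pv_add_len_le vs s
      simp only [List.length_cons]
      omega
    · have hc : (s : List Int).contains v = false := by simpa using hv
      rw [if_neg (by simp [hv])]
      have hs' : ((s : List Int) ++ [v]).Nodup := by
        simp [List.nodup_append, hs]
        exact fun a ha hav => hv (hav ▸ ha)
      have h' : ¬ ((s ++ [v]) ++ vs).Nodup := by simpa using h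
      have := ih (s ++ [v]) hs' h'
      simp only [List.length_append, List.length_cons,
        List.length_nil] at this ⊢
      omega

-- A computes "flatten has a duplicate"
theorem pv_A_char (square : List (List Int)) :
    any_duplicates square = !decide (square.flatten.Nodup) := by
  unfold any_duplicates
  rw [pv_flatten]
  simp only [List.nil_append]
  by_cases h : square.flatten.Nodup
  · have he : PySem.Set.ofList square.flatten = square.flatten := by
      rw [PySem.Set.ofList_eq_foldl]
      simpa using pv_foldl_add_of_nodup square.flatten [] (by simpa using h)
    simp only [he, PySem.Set.len]
    simp [h]
  · have hlt := pv_foldl_add_lt square.flatten [] (by simp) (by simpa using h)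
    have hne : ¬ (PySem.Set.len (PySem.Set.ofList square.flatten) = (square.flatten.length : Int)) := by
      rw [PySem.Set.ofList_eq_foldl]
      simp only [PySem.Set.len]
      simp only [List.length_nil, Nat.zero_add] at hlt
      omega
    rw [if_neg (by simpa using hne)]
    simp [h]

-- B's inner loop: succeeds iff no duplicate appears, returning seen ++ row
theorem pv_altRow_char (row : List Int) (seen : PySem.Set Int) (hs : (seen : List Int).Nodup) :
    altRow row seen = if (seen ++ row).Nodup then some (seen ++ row) else none := by
  induction row generalizing seen with
  | nil => simp [altRow, hs]
  | cons v vs ih =>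
    simp only [altRow]
    by_cases hv : v ∈ (seen : List Int)
    · have hc : (seen : List Int).contains v = true := List.elem_eq_true_of_mem hv
      rw [if_pos hc]
      have hnd : ¬ (seen ++ v :: vs).Nodup := by
        intro hn
        exact (List.disjoint_of_nodup_append hn) hv (by simp)
      rw [if_neg hnd]
    · have hc : (seen : List Int).contains v = false := by simpa using hv
      rw [if_neg (by simp [hv])]
      have hadd : PySem.Set.add seen v = seen ++ [v] := by
        simp [PySem.Set.add, hv]
      have hs' : ((seen : List Int) ++ [v]).Nodup := by
        simp [List.nodup_append, hs]
        exact fun a ha hav => hv (hav ▸ ha)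
      rw [hadd, ih (seen ++ [v]) hs']
      have hiff : ((seen ++ [v]) ++ vs).Nodup ↔ (seen ++ v :: vs).Nodup := by simp
      by_cases h : (seen ++ v :: vs).Nodup
      · rw [if_pos (hiff.mpr h), if_pos h]
        simp
      · rw [if_neg ((not_iff_not.mpr hiff).mpr h), if_neg h]

-- B's outer loop: reports "seen ++ flatten rows has a duplicate"
theorem pv_altGo_char (rows : List (List Int)) (seen : PySem.Set Int)
    (hs : (seen : List Int).Nodup) :
    altGo rows seen = !decide ((seen ++ rows.flatten).Nodup) := by
  induction rows generalizing seen with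
  | nil => simp [altGo, hs]
  | cons r rs ih =>
    simp only [altGo, pv_altRow_char r seen hs]
    by_cases h : ((seen : List Int) ++ r).Nodup
    · rw [if_pos h]
      show altGo rs (seen ++ r) = _
      rw [ih (seen ++ r) h, List.flatten_cons, ← List.append_assoc]
    · rw [if_neg h]
      have hne : ¬ ((seen : List Int) ++ (r :: rs).flatten).Nodup := by
        intro hn
        rw [List.flatten_cons, ← List.append_assoc] at hn
        exact h hn.of_append_left
      show true = _
      simpa using hne

-- ===== VERDICT (by name: the statement is the Claim_ definition above) =====
theorem any_duplicates_spec : Claim_equal_any_duplicates := by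
  intro square _
  unfold Spec_any_duplicates
  rw [pv_A_char]
  unfold any_duplicates_alt
  rw [pv_altGo_char square PySem.Set.empty (by simp [PySem.Set.empty])]
  simp [PySem.Set.empty]
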